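-- pv_equiv track=rewrite | github.com/areljannC/self-taught-dsa | 001_UC_Berkeley_CS_61A/007_Week_7/Lab_5/insert_items.py | insert_items
-- ===== SOURCE A (Python) =====
-- from typing import List
--
-- def insert_items(s: List[int], before: int, after: int):
--     ep = len(s) - 1
--     s.extend([None] * s.count(before))
--     ap = len(s) - 1
--
--     while ep >= 0:
--         if s[ep] == before:
--             s[ap] = after
--             s[ap - 1] = s[ep]
--             ap = ap - 1
--         else:
--             s[ap] = s[ep]
--         ep, ap = ep - 1, ap - 1
--
--     return s
-- ===== SOURCE B (Python) =====
-- def insert_items(s, before, after):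
--     result = []
--     for x in s:
--         result.append(x)
--         if x == before:
--             result.append(after)
--     s[:] = result
--     return s
-- ===== Notes on version B (the rewrite author's own statement) =====
-- stated objective: simpler
-- what changed: Replaced the count+None-preallocation and backward two-pointer in-place shift by a single forward pass that accumulates each element (plus 'after' following each 'before') into a new list written back with s[:] = result.
import Mathlib
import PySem

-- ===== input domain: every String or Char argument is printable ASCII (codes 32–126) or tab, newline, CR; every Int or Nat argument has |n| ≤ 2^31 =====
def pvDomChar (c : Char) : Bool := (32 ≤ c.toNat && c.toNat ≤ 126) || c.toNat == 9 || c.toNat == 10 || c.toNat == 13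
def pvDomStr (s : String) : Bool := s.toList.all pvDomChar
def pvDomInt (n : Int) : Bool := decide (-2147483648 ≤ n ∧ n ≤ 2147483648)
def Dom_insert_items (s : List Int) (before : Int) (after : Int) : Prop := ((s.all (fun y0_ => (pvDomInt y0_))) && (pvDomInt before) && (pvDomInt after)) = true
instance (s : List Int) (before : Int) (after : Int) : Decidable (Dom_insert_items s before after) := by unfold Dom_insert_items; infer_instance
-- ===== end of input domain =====

-- B replaces A's count+None-preallocation and backward two-pointer shift by one forward
-- accumulating pass (simpler); equivalence is about the RETURN value — Python A and B both
-- also mutate s in place to that same value.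

-- ===== PORT A =====
-- The Python buffer temporarily holds None placeholders, so the buffer is List (Option Int);
-- every placeholder is overwritten before the loop ends.  The while loop 'while ep >= 0'
-- recurses on the fuel ep+1 (the loop decrements ep by exactly 1 each iteration).
def insAuxA (before after : Int) : Nat → List (Option Int) → Int → List (Option Int)
  | 0, buf, _ => buf                      -- ep = -1 : loop exits
  | ep1+1, buf, ap =>                     -- current ep = ep1 ≥ 0
      let ep : Int := (ep1 : Int)
      if PySem.List.pyGetD buf ep none = some before then  -- s[ep] == before (s[ep] is an int here)
        let buf1 := PySem.List.pySetD buf ap (some after)            -- s[ap] = after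
        let buf2 := PySem.List.pySetD buf1 (ap - 1) (PySem.List.pyGetD buf1 ep none)  -- s[ap-1] = s[ep]
        insAuxA before after ep1 buf2 (ap - 2)             -- ap = ap - 1; ep, ap = ep-1, ap-1
      else
        insAuxA before after ep1 (PySem.List.pySetD buf ap (PySem.List.pyGetD buf ep none)) (ap - 1)

def insert_items (s : List Int) (before : Int) (after : Int) : List Int :=
  -- ep = len(s) - 1, so the loop runs len(s) iterations: fuel = s.length
  let buf := s.map some ++ List.replicate (PySem.List.count s before) (none : Option Int)  -- s.extend([None]*s.count(before))
  let ap : Int := (buf.length : Int) - 1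
  -- the returned Python list contains only ints (all placeholders were overwritten): extract them
  (insAuxA before after s.length buf ap).map (fun o => o.getD 0)

-- ===== PORT B =====
-- one forward pass: append x, and after it also append `after` when x == before
def insert_items_alt (s : List Int) (before : Int) (after : Int) : List Int :=
  s.foldl (fun result x =>
    let result := result ++ [x]
    if x = before then result ++ [after] else result) []

-- ===== PRECONDITION & SPEC =====
def Spec_insert_items (s : List Int) (before : Int) (after : Int) (out : List Int) : Prop := out = insert_items_alt s before after
instance (s : List Int) (before : Int) (after : Int) (out : List Int) : Decidable (Spec_insert_items s before after out) := by unfold Spec_insert_items; infer_instance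

-- ===== CLAIM (what is proved, stated in full; the proofs are below) =====
def Claim_equal_insert_items : Prop := ∀ (s : List Int) (before : Int) (after : Int), Dom_insert_items s before after → Spec_insert_items s before after (insert_items s before after)

-- ===== LEMMAS AND PROOFS =====

-- the per-element output both programs produce
def pvG (before after x : Int) : List Int := if x = before then [x, after] else [x]

theorem alt_eq_flatMap (s : List Int) (before after : Int) (acc : List Int) :
    s.foldl (fun result x =>
      let result := result ++ [x]
      if x = before then result ++ [after] else result) acc
      = acc ++ s.flatMap (pvG before after) := by
  induction s generalizing acc with
  | nil => simp
  | cons y t ih =>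
      rw [List.foldl_cons, ih]
      by_cases h : y = before <;> simp [pvG, h]

-- write at the last index of the prefix C
theorem set_last_append : ∀ (C rest : List (Option Int)) (v : Option Int), C ≠ [] →
    (C ++ rest).set (C.length - 1) v = C.dropLast ++ v :: rest
  | [], _, _, h => absurd rfl h
  | [c], rest, v, _ => by simp
  | c :: c2 :: cs, rest, v, _ => by
      have ih := set_last_append (c2 :: cs) rest v (by simp)
      simp only [List.cons_append, List.length_cons, Nat.succ_sub_one] at ih ⊢
      simp [List.set, ih]

theorem setD_last (C rest : List (Option Int)) (v : Option Int) (i : Int)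
    (hC : C ≠ []) (hi : i = (C.length : Int) - 1) :
    PySem.List.pySetD (C ++ rest) i v = C.dropLast ++ v :: rest := by
  subst hi
  have hp : 0 < C.length := List.length_pos_iff.mpr hC
  rw [PySem.List.pySetD_of_nonneg]
  · rw [show ((C.length : Int) - 1).toNat = C.length - 1 from by omega]
    exact set_last_append C rest v hC
  · omega

-- read at the index just past the prefix P
theorem getD_boundary (P : List (Option Int)) (y : Option Int) (rest : List (Option Int))
    (d : Option Int) (i : Int) (hi : i = (P.length : Int)) :
    PySem.List.pyGetD (P ++ y :: rest) i d = y := by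
  subst hi
  rw [show ((P.length : Int)) = ((P.length : Nat) : Int) from rfl,
      PySem.List.pyGetD_natCast]
  simp [List.getD_eq_getElem?_getD]

-- main invariant of A's backward loop: the first t.length cells hold t, then
-- junk.length = count t before garbage cells (never read), then finished output.
theorem insAuxA_invariant (before after : Int) :
    ∀ (t : List Int) (junk out : List (Option Int)),
      junk.length = PySem.List.count t before →
      insAuxA before after t.length (t.map some ++ junk ++ out)
        ((t.length : Int) + (junk.length : Int) - 1)
      = (t.flatMap (pvG before after)).map some ++ out := by
  intro t
  induction t using List.reverseRecOn with
  | nil =>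
      intro junk out hlen
      have hj : junk = [] := List.eq_nil_of_length_eq_zero (by simpa [PySem.List.count] using hlen)
      subst hj; simp [insAuxA]
  | append_singleton t' x ih =>
      intro junk out hlen
      have hcnt : PySem.List.count (t' ++ [x]) before
          = PySem.List.count t' before + (if x = before then 1 else 0) := by
        by_cases h : x = before <;>
          simp [PySem.List.count, List.count_append, h]
      have hlen' : junk.length = PySem.List.count t' before + (if x = before then 1 else 0) := by
        rw [hlen, hcnt]
      have hread : PySem.List.pyGetD ((t' ++ [x]).map some ++ junk ++ out) ((t'.length : Int)) none
          = some x := by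
        have hsh : (t' ++ [x]).map some ++ junk ++ out
            = t'.map some ++ (some x :: (junk ++ out)) := by simp
        rw [hsh]
        exact getD_boundary _ _ _ _ _ (by simp)
      simp only [List.length_append, List.length_singleton, insAuxA]
      rw [show ((t'.length + 1 : Nat) : Int) = (t'.length : Int) + 1 from by push_cast; ring] at *
      rw [hread]
      by_cases hx : x = before
      · -- matched: two writes
        rw [if_pos (show some x = some before from by rw [hx])]
        rw [if_pos hx] at hlen'
        have hjne : junk ≠ [] := by
          intro h; rw [h] at hlen'; simp at hlen'
        have hjl : 0 < junk.length := List.length_pos_iff.mpr hjne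
        set C1 : List (Option Int) := t'.map some ++ some x :: junk with hC1
        have hbuf : (t' ++ [x]).map some ++ junk ++ out = C1 ++ out := by simp [hC1]
        have hlenC1 : (C1.length : Int) = (t'.length : Int) + 1 + junk.length := by
          simp [hC1]; omega
        rw [hbuf, setD_last C1 out (some after) _ (by simp [hC1]) (by rw [hlenC1])]
        have hC1d : C1.dropLast = t'.map some ++ some x :: junk.dropLast := by
          rw [hC1, List.dropLast_append_of_ne_nil (by simp), List.dropLast_cons_of_ne_nil hjne]
        rw [hC1d]
        -- second read: s[ep] on the updated buffer
        rw [show t'.map some ++ some x :: junk.dropLast ++ some after :: out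
              = t'.map some ++ (some x :: (junk.dropLast ++ some after :: out)) from by simp,
            getD_boundary (t'.map some) (some x) _ none _ (by simp)]
        set C2 : List (Option Int) := t'.map some ++ some x :: junk.dropLast with hC2
        have hlenC2 : (C2.length : Int) = (t'.length : Int) + (junk.length : Int) := by
          simp only [hC2, List.length_append, List.length_cons, List.length_map, List.length_dropLast]
          omega
        have hrw : t'.map some ++ (some x :: (junk.dropLast ++ some after :: out))
            = C2 ++ some after :: out := by simp [hC2]
        rw [hrw, setD_last C2 (some after :: out) (some x) _ (by simp [hC2]) (by rw [hlenC2]; ring)]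
        have hC2d : C2.dropLast = t'.map some ++ (some x :: junk.dropLast).dropLast := by
          rw [hC2, List.dropLast_append_of_ne_nil (by simp)]
        rw [hC2d]
        have hlen'' : ((some x :: junk.dropLast).dropLast).length = PySem.List.count t' before := by
          simp only [List.length_dropLast, List.length_cons]; omega
        rw [show t'.map some ++ (some x :: junk.dropLast).dropLast ++ some x :: some after :: out
              = t'.map some ++ ((some x :: junk.dropLast).dropLast) ++ (some x :: some after :: out) from by simp,
            show (t'.length : Int) + 1 + (junk.length : Int) - 1 - 2
              = (t'.length : Int) + (((some x :: junk.dropLast).dropLast).length : Int) - 1 from by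
          simp only [List.length_cons, List.length_dropLast]; omega]
        rw [ih ((some x :: junk.dropLast).dropLast) (some x :: some after :: out) hlen'']
        simp [pvG, hx]
      · -- not matched: one write
        rw [if_neg (show ¬ some x = some before from by simpa using hx)]
        rw [if_neg hx] at hlen'
        set C1 : List (Option Int) := t'.map some ++ some x :: junk with hC1
        have hbuf : (t' ++ [x]).map some ++ junk ++ out = C1 ++ out := by simp [hC1]
        have hlenC1 : (C1.length : Int) = (t'.length : Int) + 1 + junk.length := by
          simp [hC1]; omega
        rw [hbuf, setD_last C1 out (some x) _ (by simp [hC1]) (by rw [hlenC1])]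
        have hC1d : C1.dropLast = t'.map some ++ (some x :: junk).dropLast := by
          rw [hC1, List.dropLast_append_of_ne_nil (by simp)]
        rw [hC1d]
        have hlen'' : ((some x :: junk).dropLast).length = PySem.List.count t' before := by
          simp only [List.length_dropLast, List.length_cons]; omega
        rw [show t'.map some ++ (some x :: junk).dropLast ++ some x :: out
              = t'.map some ++ ((some x :: junk).dropLast) ++ (some x :: out) from by simp,
            show (t'.length : Int) + 1 + (junk.length : Int) - 1 - 1
              = (t'.length : Int) + (((some x :: junk).dropLast).length : Int) - 1 from by
          simp only [List.length_cons, List.length_dropLast]; omega]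
        rw [ih ((some x :: junk).dropLast) (some x :: out) hlen'']
        simp [pvG, hx]

theorem insert_items_eq_flatMap (s : List Int) (before after : Int) :
    insert_items s before after = s.flatMap (pvG before after) := by
  unfold insert_items
  have h := insAuxA_invariant before after s
      (List.replicate (PySem.List.count s before) (none : Option Int)) [] (by simp)
  simp only [List.append_nil] at h
  show (insAuxA before after s.length
      (s.map some ++ List.replicate (PySem.List.count s before) (none : Option Int))
      (((s.map some ++ List.replicate (PySem.List.count s before) (none : Option Int)).length : Int) - 1)).map
      (fun o => o.getD 0) = _
  rw [show (((s.map some ++ List.replicate (PySem.List.count s before) (none : Option Int)).length : Int) - 1)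
        = (s.length : Int) + ((List.replicate (PySem.List.count s before) (none : Option Int)).length : Int) - 1 from by
      simp only [List.length_append, List.length_map, List.length_replicate]; push_cast; ring,
    h]
  simp [List.map_map, Function.comp_def]

-- ===== VERDICT (by name: the statement is the Claim_ definition above) =====
theorem insert_items_spec : Claim_equal_insert_items := by
  intro s before after _
  unfold Spec_insert_items insert_items_alt
  rw [insert_items_eq_flatMap, alt_eq_flatMap]
  simp
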